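-- pv_equiv track=rewrite | github.com/Datonix-art/Data-Structures-and-Algorithms | 08/script.py | halved_section
-- ===== SOURCE A (Python) =====
-- def halved_section(n):
--     rows = []
--     i = n
--     while i > 0:
--         col = []
--         for j in range(i+1):
--             col.append(j)
--         rows.append(col)
--         i //= 2
--     return rows
-- ===== SOURCE B (Python) =====
-- def halved_section(n):
--     if n <= 0:
--         return []
--     return [list(range(n + 1))] + halved_section(n // 2)
-- ===== Notes on version B (the rewrite author's own statement) =====
-- stated objective: simpler
-- what changed: Replaces the iterative while-loop with an accumulator list and an inner append loop by a direct recursion over the halving structure, building each row with list(range(i+1)).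
import Mathlib
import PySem

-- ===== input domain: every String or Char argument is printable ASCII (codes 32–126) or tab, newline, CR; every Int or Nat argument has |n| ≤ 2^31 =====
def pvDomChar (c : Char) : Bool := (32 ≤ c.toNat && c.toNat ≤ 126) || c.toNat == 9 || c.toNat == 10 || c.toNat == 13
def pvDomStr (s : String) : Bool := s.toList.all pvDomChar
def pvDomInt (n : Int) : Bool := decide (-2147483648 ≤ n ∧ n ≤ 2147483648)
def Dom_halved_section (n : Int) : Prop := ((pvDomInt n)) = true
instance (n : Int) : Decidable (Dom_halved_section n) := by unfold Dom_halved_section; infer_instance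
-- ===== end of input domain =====

-- B replaces A's while-loop with accumulator and inner append loop by a direct
-- recursion over the halving structure (objective: simpler).

-- ===== PORT A =====
-- while i > 0: build col by appending each j in range(i+1); rows.append(col); i //= 2
def halved_section_go (i : Int) (rows : List (List Int)) : List (List Int) :=
  if 0 < i then
    let col := (PySem.List.pyRange 0 (i + 1) 1).foldl (fun c j => c ++ [j]) []
    halved_section_go (PySem.Int.floordiv i 2) (rows ++ [col])
  else rows
termination_by i.toNat
decreasing_by
  rename_i h
  rw [PySem.Int.floordiv_eq_ediv_of_pos (by omega)]
  omega

def halved_section (n : Int) : List (List Int) :=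
  halved_section_go n []

-- ===== PORT B =====
def halved_section_alt (n : Int) : List (List Int) :=
  if n ≤ 0 then []
  else PySem.List.pyRange 0 (n + 1) 1 :: halved_section_alt (PySem.Int.floordiv n 2)
termination_by n.toNat
decreasing_by
  rename_i h
  rw [PySem.Int.floordiv_eq_ediv_of_pos (by omega)]
  omega

-- ===== PRECONDITION & SPEC =====
def Spec_halved_section (n : Int) (out : List (List Int)) : Prop := out = halved_section_alt n
instance (n : Int) (out : List (List Int)) : Decidable (Spec_halved_section n out) := by unfold Spec_halved_section; infer_instance

-- ===== CLAIM (what is proved, stated in full; the proofs are below) =====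
def Claim_equal_halved_section : Prop := ∀ (n : Int), Dom_halved_section n → Spec_halved_section n (halved_section n)

-- ===== LEMMAS AND PROOFS =====
theorem foldl_append_singleton (l : List Int) (acc : List Int) :
    l.foldl (fun c j => c ++ [j]) acc = acc ++ l := by
  induction l generalizing acc with
  | nil => simp
  | cons x xs ih => simp [List.foldl, ih]

theorem halved_section_go_eq (i : Int) (rows : List (List Int)) :
    halved_section_go i rows = rows ++ halved_section_alt i := by
  rw [halved_section_go, halved_section_alt]
  split_ifs with h1 h2
  · omega
  · rw [halved_section_go_eq (PySem.Int.floordiv i 2) _,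
      foldl_append_singleton]
    simp
  · simp
  · omega
termination_by i.toNat
decreasing_by
  rw [PySem.Int.floordiv_eq_ediv_of_pos (by omega)]
  omega

-- ===== VERDICT (by name: the statement is the Claim_ definition above) =====
theorem halved_section_spec : Claim_equal_halved_section := by
  intro n _
  unfold Spec_halved_section halved_section
  simpa using halved_section_go_eq n []
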